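-- pv_equiv track=rewrite | github.com/apharo17/abac_policy_mining | src/xsmining.py | _check
-- ===== SOURCE A (Python) =====
-- def _check(pattern):
--     count_u = 0
--     count_r = 0
--     for attval in pattern:
--         if attval[0] == 'U':
--             count_u += 1
--         if attval[0] == 'R':
--             count_r += 1
--
--     if count_u > 0 and count_r > 0:
--         return True
--     return False
-- ===== SOURCE B (Python) =====
-- def _has_prefix(pattern, ch):
--     for attval in pattern:
--         if attval[0] == ch:
--             return True
--     return False
--
--
-- def _check(pattern):
--     return _has_prefix(pattern, 'U') and _has_prefix(pattern, 'R')
-- ===== Notes on version B (the rewrite author's own statement) =====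
-- stated objective: alternative
-- what changed: Replaces A's single full-list pass maintaining two counters with two independent short-circuiting searches (a helper scanned once per prefix, returning at the first match, and the second search skipped entirely when the first fails), so B traverses different elements than A and keeps no counts.
import Mathlib
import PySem

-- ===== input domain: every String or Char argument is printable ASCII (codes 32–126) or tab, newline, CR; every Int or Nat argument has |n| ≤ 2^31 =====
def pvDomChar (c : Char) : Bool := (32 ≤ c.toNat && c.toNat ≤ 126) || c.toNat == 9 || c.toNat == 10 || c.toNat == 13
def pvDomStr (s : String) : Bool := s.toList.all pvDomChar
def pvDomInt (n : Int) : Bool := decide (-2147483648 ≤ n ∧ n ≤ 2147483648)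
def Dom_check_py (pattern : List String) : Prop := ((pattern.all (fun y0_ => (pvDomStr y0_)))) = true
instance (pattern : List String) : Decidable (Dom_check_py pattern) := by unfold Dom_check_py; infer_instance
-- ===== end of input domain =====

-- B replaces A's full-pass double counting with two independent short-circuiting searches (objective: alternative).

-- ===== PORT A =====
-- two counters, one full pass, then compare both with 0
def check_py (pattern : List String) : Bool :=
  let counts := pattern.foldl (fun (st : Int × Int) attval =>
    let st := if PySem.Str.pyGet? attval 0 == some 'U' then (st.1 + 1, st.2) else st
    let st := if PySem.Str.pyGet? attval 0 == some 'R' then (st.1, st.2 + 1) else st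
    st) (0, 0)
  if counts.1 > 0 ∧ counts.2 > 0 then true else false

-- ===== PORT B =====
-- helper: scan for the first element whose first character is ch, returning at the first match
def hasPrefixB (pattern : List String) (ch : Char) : Bool :=
  match pattern with
  | [] => false
  | attval :: rest =>
    if PySem.Str.pyGet? attval 0 == some ch then true else hasPrefixB rest ch

-- one search per prefix; '&&' short-circuits like Python's 'and'
def check_py_alt (pattern : List String) : Bool :=
  hasPrefixB pattern 'U' && hasPrefixB pattern 'R'

-- ===== PRECONDITION & SPEC =====
-- Pre_ excludes patterns containing an empty string: there attval[0] raises IndexError in A.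
def Pre_check_py (pattern : List String) : Prop := (pattern.all (fun s => !(s == ""))) = true
instance (pattern : List String) : Decidable (Pre_check_py pattern) := by unfold Pre_check_py; infer_instance
def pvWitness_check_py : List String := ["Uid", "Rrole"]
def Spec_check_py (pattern : List String) (out : Bool) : Prop := out = check_py_alt pattern
instance (pattern : List String) (out : Bool) : Decidable (Spec_check_py pattern out) := by unfold Spec_check_py; infer_instance

-- ===== CLAIM (what is proved, stated in full; the proofs are below) =====
def Claim_equal_check_py : Prop := ∀ (pattern : List String), Dom_check_py pattern → Pre_check_py pattern → Spec_check_py pattern (check_py pattern)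

-- ===== LEMMAS AND PROOFS =====

-- A's loop adds to each counter exactly the number of matching first characters.
theorem check_py_foldl_counts (l : List String) (cu cr : Int) :
    l.foldl (fun (st : Int × Int) attval =>
      let st := if PySem.Str.pyGet? attval 0 == some 'U' then (st.1 + 1, st.2) else st
      let st := if PySem.Str.pyGet? attval 0 == some 'R' then (st.1, st.2 + 1) else st
      st) (cu, cr)
    = (cu + ((l.map (fun s => PySem.Str.pyGet? s 0)).count (some 'U') : Int),
       cr + ((l.map (fun s => PySem.Str.pyGet? s 0)).count (some 'R') : Int)) := by
  induction l generalizing cu cr with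
  | nil => simp
  | cons h t ih =>
    simp only [List.foldl_cons, List.map_cons, List.count_cons]
    rw [ih]
    by_cases hu : PySem.Str.pyGet? h 0 = some 'U' <;>
      by_cases hr : PySem.Str.pyGet? h 0 = some 'R' <;>
      simp only [hu, hr, beq_iff_eq, beq_self_eq_true, if_true, if_false,
        Option.some.injEq, Prod.mk.injEq] <;>
      constructor <;> (try split_ifs) <;> simp_all <;> (try ring)

-- B's search succeeds iff some element's first character is ch.
theorem hasPrefixB_eq_any (l : List String) (ch : Char) :
    hasPrefixB l ch = l.any (fun s => PySem.Str.pyGet? s 0 == some ch) := by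
  induction l with
  | nil => rfl
  | cons h t ih =>
    unfold hasPrefixB
    rw [List.any_cons, ih]
    cases hb : (PySem.Str.pyGet? h 0 == some ch) <;> simp

-- ===== VERDICT (by name: the statement is the Claim_ definition above) =====
theorem check_py_spec : Claim_equal_check_py := by
  intro pattern _ _
  unfold Spec_check_py check_py check_py_alt
  rw [check_py_foldl_counts, hasPrefixB_eq_any, hasPrefixB_eq_any]
  have key : ∀ ch : Char,
      ((0:Int) + (((pattern.map (fun s => PySem.Str.pyGet? s 0)).count (some ch) : Int)) > 0)
        ↔ (pattern.any (fun s => PySem.Str.pyGet? s 0 == some ch)) = true := by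
    intro ch
    rw [zero_add]
    constructor
    · intro h
      have hm := List.count_pos_iff.mp (show 0 < (pattern.map (fun s => PySem.Str.pyGet? s 0)).count (some ch) by exact_mod_cast h)
      rcases List.mem_map.mp hm with ⟨w, hw, he⟩
      simp only [List.any_eq_true, beq_iff_eq]
      exact ⟨w, hw, he⟩
    · intro h
      simp only [List.any_eq_true, beq_iff_eq] at h
      rcases h with ⟨w, hw, he⟩
      exact_mod_cast List.count_pos_iff.mpr (List.mem_map.mpr ⟨w, hw, he⟩)
  rw [if_congr (and_congr (key 'U') (key 'R')) rfl rfl]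
  cases hu : pattern.any (fun s => PySem.Str.pyGet? s 0 == some 'U') <;>
    cases hr : pattern.any (fun s => PySem.Str.pyGet? s 0 == some 'R') <;>
    simp
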